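-- pv_equiv track=rewrite | github.com/Middeline/FIB | CAIM/Lab/Lab1/CountWordsHeap.py | depurar_document
-- ===== SOURCE A (Python) =====
-- def depurar_document(paraula):
--     if paraula.isalpha():
--         size = len(paraula)-2
--         for i in range(size):
--             if paraula[i] == paraula[i+1] and paraula[i] == paraula[i+2]:
--                 return False
--         return True
--     return False
-- ===== SOURCE B (Python) =====
-- def depurar_document(paraula):
--     # run-length scan: reject non-alphabetic words, and any run of 3+ equal consecutive chars
--     if not paraula.isalpha():
--         return False
--     prev = None
--     run = 0
--     for c in paraula:
--         run = run + 1 if c == prev else 1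
--         prev = c
--         if run >= 3:
--             return False
--     return True
-- ===== Notes on version B (the rewrite author's own statement) =====
-- stated objective: simpler
-- what changed: Replaces the indexed triple-comparison loop (paraula[i]==paraula[i+1]==paraula[i+2] over range(len-2)) with a single run-length scan over the characters that tracks the current run of equal chars and rejects when a run reaches 3.
import Mathlib
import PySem

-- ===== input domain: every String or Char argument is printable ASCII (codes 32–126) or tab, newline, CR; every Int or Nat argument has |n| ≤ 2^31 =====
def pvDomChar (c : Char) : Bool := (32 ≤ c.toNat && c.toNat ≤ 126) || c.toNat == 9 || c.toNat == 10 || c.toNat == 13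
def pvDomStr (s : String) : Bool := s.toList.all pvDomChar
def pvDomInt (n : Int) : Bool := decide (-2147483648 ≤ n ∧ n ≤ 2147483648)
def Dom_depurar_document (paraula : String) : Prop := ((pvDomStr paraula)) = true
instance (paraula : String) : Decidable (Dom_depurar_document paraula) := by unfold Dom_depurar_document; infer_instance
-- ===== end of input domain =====

-- B replaces A's indexed triple-comparison loop with a run-length scan (objective: simpler).

-- ===== PORT A =====
-- the 'for i in range(size)' loop of A: recursion over the index list
def pvALoop (s : List Char) : List Int → Bool
  | [] => true
  | i :: rest =>
    if PySem.List.pyGet? s i == PySem.List.pyGet? s (i+1)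
        && PySem.List.pyGet? s i == PySem.List.pyGet? s (i+2) then false
    else pvALoop s rest

def depurar_document (paraula : String) : Bool :=
  if PySem.Str.strIsalpha paraula then
    let size : Int := PySem.Str.len paraula - 2
    pvALoop paraula.toList (PySem.List.pyRange 0 size 1)
  else false

-- ===== PORT B =====
-- the run-length scan of Source B: state (prev, run)
def pvBLoop : List Char → Option Char → Int → Bool
  | [], _, _ => true
  | c :: rest, prev, run =>
    let run' := if some c == prev then run + 1 else 1
    if run' ≥ 3 then false else pvBLoop rest (some c) run'

def depurar_document_alt (paraula : String) : Bool :=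
  if PySem.Str.strIsalpha paraula then pvBLoop paraula.toList none 0
  else false

-- ===== PRECONDITION & SPEC =====
def Spec_depurar_document (paraula : String) (out : Bool) : Prop := out = depurar_document_alt paraula
instance (paraula : String) (out : Bool) : Decidable (Spec_depurar_document paraula out) := by unfold Spec_depurar_document; infer_instance

-- ===== CLAIM (what is proved, stated in full; the proofs are below) =====
def Claim_equal_depurar_document : Prop := ∀ (paraula : String), Dom_depurar_document paraula → Spec_depurar_document paraula (depurar_document paraula)

-- ===== LEMMAS AND PROOFS =====

-- common specification: no three equal consecutive characters
def pvNoTriple : List Char → Bool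
  | a :: b :: c :: r => if a = b ∧ a = c then false else pvNoTriple (b :: c :: r)
  | _ => true

theorem pvNoTriple_cons_of_ne {p c : Char} (h : p ≠ c) (r : List Char) :
    pvNoTriple (p :: c :: r) = pvNoTriple (c :: r) := by
  cases r with
  | nil => simp [pvNoTriple]
  | cons d r' => simp [pvNoTriple, h]

theorem pvGet0 (a : Char) (l : List Char) : PySem.List.pyGet? (a::l) 0 = some a := by
  simp only [PySem.List.pyGet?, PySem.List.pyIdx?]
  rw [if_pos (by norm_num), if_pos (by simp; try omega)]
  simp

theorem pvGet1 (a b : Char) (l : List Char) : PySem.List.pyGet? (a::b::l) 1 = some b := by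
  simp only [PySem.List.pyGet?, PySem.List.pyIdx?]
  rw [if_pos (by norm_num), if_pos (by simp; try omega)]
  simp

theorem pvGet2 (a b c : Char) (l : List Char) : PySem.List.pyGet? (a::b::c::l) 2 = some c := by
  simp only [PySem.List.pyGet?, PySem.List.pyIdx?]
  rw [if_pos (by norm_num), if_pos (by simp; omega)]
  simp

-- shifting every index by one drops the head of the scanned list
theorem pvALoop_shift (c : Char) (s : List Char) (l : List Int) (h : ∀ i ∈ l, 0 ≤ i) :
    pvALoop (c :: s) (l.map (· + 1)) = pvALoop s l := by
  induction l with
  | nil => rfl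
  | cons i rest ih =>
    have g : ∀ j : Int, 0 ≤ j → PySem.List.pyGet? (c :: s) (j + 1) = PySem.List.pyGet? s j := by
      intro j hj
      have hje : j = ((j.toNat : Int)) := by omega
      rw [hje, PySem.List.pyGet?_cons_succ]
    have hi : 0 ≤ i := h i (by simp)
    have e2 : i + 1 + 2 = (i + 2) + 1 := by ring
    simp only [List.map_cons, pvALoop]
    rw [g i hi, e2, g (i+2) (by omega), g (i+1) (by omega),
        ih (fun j hj => h j (by simp [hj]))]

theorem pvRange_shift (n : Int) (hn : 0 ≤ n) :
    PySem.List.pyRange 1 (n+1) 1 = (PySem.List.pyRange 0 n 1).map (· + 1) := by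
  rw [PySem.List.pyRange_one, PySem.List.pyRange_one, List.map_map]
  have : (n + 1 - 1).toNat = (n - 0).toNat := by omega
  rw [this]
  exact List.map_congr_left (fun k _ => by simp [Function.comp]; omega)

theorem pvALoop_eq_noTriple (s : List Char) :
    pvALoop s (PySem.List.pyRange 0 ((s.length : Int) - 2) 1) = pvNoTriple s := by
  induction s using pvNoTriple.induct with
  | case1 a b c r hbc =>
    have hlen : (((a :: b :: c :: r).length : Int)) - 2 = (r.length : Int) + 1 := by
      simp; omega
    rw [hlen, PySem.List.pyRange_one_cons (by omega)]
    simp only [pvALoop]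
    rw [show (0:Int) + 1 = 1 from rfl, show (0:Int) + 2 = 2 from rfl,
        pvGet0, pvGet1 a b, pvGet2 a b c]
    obtain ⟨rfl, rfl⟩ := hbc
    simp [pvNoTriple]
  | case2 a b c r hbc ih =>
    have hlen : (((a :: b :: c :: r).length : Int)) - 2 = (r.length : Int) + 1 := by
      simp; omega
    rw [hlen, PySem.List.pyRange_one_cons (by omega)]
    simp only [pvALoop]
    rw [show (0:Int) + 1 = 1 from rfl, show (0:Int) + 2 = 2 from rfl,
        pvGet0, pvGet1 a b, pvGet2 a b c,
        pvRange_shift (r.length : Int) (by positivity),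
        pvALoop_shift a (b :: c :: r) _
          (fun i hi => ((PySem.List.mem_pyRange_one).mp hi).1)]
    have hb : (some a == some b && some a == some c) = false := by
      rcases not_and_or.mp hbc with h' | h' <;> simp [h']
    rw [hb]
    simp only [Bool.false_eq_true, if_false]
    have hlen2 : ((r.length : Int)) = (((b :: c :: r).length : Int)) - 2 := by simp; omega
    rw [hlen2, ih]
    simp [pvNoTriple, hbc]
  | case3 s h =>
    match s, h with
    | [], _ => rfl
    | [a], _ =>
      rw [show (((([a] : List Char)).length : Int)) - 2 = -1 by simp,
          PySem.List.pyRange_one_eq_nil (by omega)]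
      rfl
    | [a, b], _ =>
      rw [show ((([a, b] : List Char)).length : Int) - 2 = 0 by simp,
          PySem.List.pyRange_one_eq_nil (by omega)]
      rfl
    | a :: b :: c :: r, h => exact absurd rfl (by exact fun he => h a b c r he)

-- B-loop invariant: run counts the current run of equal chars ending at prev (run < 3)
theorem pvBLoop_inv (cs : List Char) : ∀ p : Char,
    (pvBLoop cs (some p) 1 = pvNoTriple (p :: cs)) ∧
    (pvBLoop cs (some p) 2 = pvNoTriple (p :: p :: cs)) := by
  induction cs with
  | nil => intro p; constructor <;> simp [pvBLoop, pvNoTriple]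
  | cons c r ih =>
    intro p
    by_cases hcp : c = p
    · subst hcp
      constructor
      · simp only [pvBLoop, beq_self_eq_true, if_pos]
        norm_num
        exact (ih c).2
      · simp only [pvBLoop]
        norm_num
        simp [pvNoTriple]
    · have hne : (some c == some p) = false := by simp [hcp]
      have hpc : p ≠ c := fun h => hcp h.symm
      constructor
      · simp only [pvBLoop, hne]
        norm_num
        rw [(ih c).1, pvNoTriple_cons_of_ne hpc]
      · simp only [pvBLoop, hne]
        norm_num
        rw [(ih c).1]
        have h1 : pvNoTriple (p :: p :: c :: r) = pvNoTriple (p :: c :: r) := by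
          simp [pvNoTriple, fun h : p = c => hpc h]
        rw [h1, pvNoTriple_cons_of_ne hpc]

theorem pvBLoop_eq_noTriple (cs : List Char) : pvBLoop cs none 0 = pvNoTriple cs := by
  cases cs with
  | nil => rfl
  | cons c r =>
    simp only [pvBLoop]
    norm_num
    exact (pvBLoop_inv r c).1

-- ===== VERDICT (by name: the statement is the Claim_ definition above) =====
theorem depurar_document_spec : Claim_equal_depurar_document := by
  intro paraula _
  unfold Spec_depurar_document depurar_document depurar_document_alt
  cases h : PySem.Str.strIsalpha paraula with
  | false => rw [if_neg (by simp), if_neg (by simp)]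
  | true =>
    rw [if_pos rfl, if_pos rfl]
    show pvALoop paraula.toList (PySem.List.pyRange 0 (PySem.Str.len paraula - 2) 1)
        = pvBLoop paraula.toList none 0
    rw [PySem.Str.len_eq, pvALoop_eq_noTriple, pvBLoop_eq_noTriple]
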